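-- pv_equiv track=rewrite | github.com/IMaeots/Python-Taltech-course | MX/mx_pyramids/pyramids.py | create_empty_pyramid
-- ===== SOURCE A (Python) =====
-- def create_empty_pyramid(height: int, current=1) -> str:
--     """
--     Create empty pyramid.
--
--     Use recursion!
--
--     create_empty_pyramid(4) =>    *
--                                  * *
--                                 *   *
--                                *******
--
--     :param height: Pyramid height.
--     :param current: Keeping track of current layer.
--     :return: Pyramid.
--     """
--     if current > height:
--         return ''
--
--     spaces = ' ' * (height - current)
--
--     if current == 1 or current == height:
--         row = '*' * (2 * current - 1)
--     else:
--         row = '*' + ' ' * (2 * current - 3) + '*'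
--
--     return spaces + row + '\n' + create_empty_pyramid(height, current + 1)
-- ===== SOURCE B (Python) =====
-- def create_empty_pyramid(height: int, current=1) -> str:
--     """Iterative version: build each layer in one pass and join."""
--     parts = []
--     for c in range(current, height + 1):
--         spaces = ' ' * (height - c)
--         if c == 1 or c == height:
--             row = '*' * (2 * c - 1)
--         else:
--             row = '*' + ' ' * (2 * c - 3) + '*'
--         parts.append(spaces + row + '\n')
--     return ''.join(parts)
-- ===== Notes on version B (the rewrite author's own statement) =====
-- stated objective: alternative
-- what changed: Replaced the tail recursion that rebuilds a string suffix at every level with a single iterative pass over range(current, height+1) that collects each layer into a list and joins once.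
import Mathlib
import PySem

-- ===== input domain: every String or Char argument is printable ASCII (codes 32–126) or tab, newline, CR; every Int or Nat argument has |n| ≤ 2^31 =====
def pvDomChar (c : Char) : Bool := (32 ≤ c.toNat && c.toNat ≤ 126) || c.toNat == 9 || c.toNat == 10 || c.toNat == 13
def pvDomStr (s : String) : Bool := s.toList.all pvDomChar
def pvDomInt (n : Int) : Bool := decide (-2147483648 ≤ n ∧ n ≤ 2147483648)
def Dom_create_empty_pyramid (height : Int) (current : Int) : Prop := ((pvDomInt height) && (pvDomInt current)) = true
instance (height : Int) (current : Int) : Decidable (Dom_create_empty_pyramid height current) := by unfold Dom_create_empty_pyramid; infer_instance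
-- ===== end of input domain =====

-- B replaces A's tail recursion with one iterative pass collecting layers into a list joined once (same cost, different decomposition).

-- ===== PORT A =====
-- A's recursion, on List Char (strings are ported on the list side per PySem convention);
-- ' ' * n with n < 0 is '' in Python, matched by Int.toNat clamping.
def pyramidRecA (height current : Int) : List Char :=
  if current > height then []
  else
    let spaces := List.replicate (height - current).toNat ' '
    let row := if current = 1 ∨ current = height then
        List.replicate (2 * current - 1).toNat '*'
      else
        '*' :: (List.replicate (2 * current - 3).toNat ' ' ++ ['*'])
    spaces ++ row ++ '\n' :: pyramidRecA height (current + 1)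
termination_by (height + 1 - current).toNat
decreasing_by
  rename_i h
  omega

def create_empty_pyramid (height : Int) (current : Int) : String :=
  String.ofList (pyramidRecA height current)

-- ===== PORT B =====
-- one layer of the pyramid: spaces + row + '\n'
def pyramidLayerB (height c : Int) : List Char :=
  List.replicate (height - c).toNat ' '
    ++ (if c = 1 ∨ c = height then
          List.replicate (2 * c - 1).toNat '*'
        else
          '*' :: (List.replicate (2 * c - 3).toNat ' ' ++ ['*']))
    ++ ['\n']

def create_empty_pyramid_alt (height : Int) (current : Int) : String :=
  let parts := (PySem.List.pyRange current (height + 1) 1).foldl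
    (fun acc c => acc ++ [pyramidLayerB height c]) []
  String.ofList parts.flatten

-- ===== PRECONDITION & SPEC =====
def Spec_create_empty_pyramid (height : Int) (current : Int) (out : String) : Prop := out = create_empty_pyramid_alt height current
instance (height : Int) (current : Int) (out : String) : Decidable (Spec_create_empty_pyramid height current out) := by unfold Spec_create_empty_pyramid; infer_instance

-- ===== CLAIM (what is proved, stated in full; the proofs are below) =====
def Claim_equal_create_empty_pyramid : Prop := ∀ (height : Int) (current : Int), Dom_create_empty_pyramid height current → Spec_create_empty_pyramid height current (create_empty_pyramid height current)

-- ===== LEMMAS AND PROOFS =====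

theorem pyramidRecA_eq_flatten (n : ℕ) : ∀ (height current : Int),
    (height + 1 - current).toNat = n →
    pyramidRecA height current
      = ((PySem.List.pyRange current (height + 1) 1).map (pyramidLayerB height)).flatten := by
  induction n with
  | zero =>
    intro h c hn
    rw [pyramidRecA]
    have hc : h < c := by omega
    rw [if_pos hc, PySem.List.pyRange_one_eq_nil (by omega)]
    simp
  | succ n ih =>
    intro h c hn
    rw [pyramidRecA]
    have hc : ¬ c > h := by omega
    rw [if_neg hc, PySem.List.pyRange_one_cons (by omega)]
    rw [ih h (c + 1) (by omega)]
    simp [pyramidLayerB]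

-- ===== VERDICT (by name: the statement is the Claim_ definition above) =====
theorem create_empty_pyramid_spec : Claim_equal_create_empty_pyramid := by
  intro height current _
  unfold Spec_create_empty_pyramid create_empty_pyramid create_empty_pyramid_alt
  rw [PySem.List.foldl_append_singleton_eq_map]
  rw [pyramidRecA_eq_flatten (height + 1 - current).toNat height current (by omega)]
  simp
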